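-- pv_equiv track=rewrite | github.com/SoingJeang/Form160 | registerforacidburn.py | nameAdd
-- ===== SOURCE A (Python) =====
-- def nameAdd(strname, lenName, addNum):
--     nRet = 1
--     listlocalSerial = [
--             'h', '1', '4', 'M', 'l', '0', 'x', '\n',
--             '7', 'k', 'C', 'H', 'w', 'X', 'B', 'z', 'H', '\t',
--             'G', '8', 'i', 'N', '9', '+', 'w', 'b', '5', 'V', 'H', 'Z'
--         ]
--     nlocalLen = len(listlocalSerial)
--     halfLocalLen = int(nlocalLen / 2)
--     nOut = 1
--     for cCharactor in strname:
--         nChara = ord(cCharactor)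
--         nPreBackadd = nChara * nRet
--         for index in range(halfLocalLen):
--             v1 = ord(listlocalSerial[nlocalLen - index - 1]) - nChara % (index + 1)
--             v2 = nPreBackadd + ord(listlocalSerial[index])
--             nPreBackadd = v1 + v2
--         nRet = addNum ^ (((nOut * nPreBackadd) << 8) & 0xffffffff)
--         nOut += 1
--     return nRet
-- ===== SOURCE B (Python) =====
-- # Table-driven rewrite: for each ASCII code n, A's 15-step inner recurrence over
-- # the serial list adds the fixed amount _STEP[n] = 2273 - sum(n % m, m=1..15) to
-- # n*nRet (the 15 index pairs cover all 30 serial chars).  The table is built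
-- # once, so the per-character inner scan disappears entirely.
-- _STEP = [2273 - sum(n % m for m in range(1, 16)) for n in range(128)]
--
-- def nameAdd(strname, lenName, addNum):
--     nRet = 1
--     for nOut, c in enumerate(strname, 1):
--         n = ord(c)
--         nRet = addNum ^ (((nOut * (n * nRet + _STEP[n])) << 8) & 0xffffffff)
--     return nRet
-- ===== Notes on version B (the rewrite author's own statement) =====
-- stated objective: faster
-- what changed: A 128-entry table of per-character contributions is precomputed once, so the 15-iteration inner recurrence over the serial list disappears: each character costs one table lookup instead of 15 list-index/modulo steps.
import Mathlib
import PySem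

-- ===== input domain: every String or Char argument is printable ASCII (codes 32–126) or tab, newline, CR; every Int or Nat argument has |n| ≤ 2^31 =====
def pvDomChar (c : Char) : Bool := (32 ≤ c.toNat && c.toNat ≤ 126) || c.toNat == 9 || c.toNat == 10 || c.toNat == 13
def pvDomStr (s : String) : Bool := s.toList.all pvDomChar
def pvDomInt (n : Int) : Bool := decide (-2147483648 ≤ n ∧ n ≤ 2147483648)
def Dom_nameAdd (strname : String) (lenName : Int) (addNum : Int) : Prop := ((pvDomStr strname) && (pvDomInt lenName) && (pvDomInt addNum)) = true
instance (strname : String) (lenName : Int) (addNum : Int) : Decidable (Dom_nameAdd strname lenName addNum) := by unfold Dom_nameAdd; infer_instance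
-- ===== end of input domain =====

-- B precomputes a 128-entry table of per-character contributions once, so A's
-- 15-iteration inner recurrence over the serial list disappears; objective: faster.

-- ===== PORT A =====
def pvSerial : List Char :=
  ['h', '1', '4', 'M', 'l', '0', 'x', '\n',
   '7', 'k', 'C', 'H', 'w', 'X', 'B', 'z', 'H', '\t',
   'G', '8', 'i', 'N', '9', '+', 'w', 'b', '5', 'V', 'H', 'Z']

-- one step of A's inner 'for index in range(halfLocalLen)' loop (indices always in range)
def pvInnerStep (nlocalLen : Int) (nChara : Int) (acc : Int) (index : Int) : Int :=
  let v1 : Int := (((PySem.List.pyGet? pvSerial (nlocalLen - index - 1)).getD ' ').toNat : Int)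
                    - PySem.Int.mod nChara (index + 1)
  let v2 : Int := acc + (((PySem.List.pyGet? pvSerial index).getD ' ').toNat : Int)
  v1 + v2

def nameAdd (strname : String) (lenName : Int) (addNum : Int) : Int :=
  let nlocalLen : Int := pvSerial.length
  let halfLocalLen : Int := 15  -- int(nlocalLen / 2)
  let step := fun (st : Int × Int) (cCharactor : Char) =>
    let nChara : Int := cCharactor.toNat
    let nPreBackadd :=
      (PySem.List.pyRange 0 halfLocalLen 1).foldl (pvInnerStep nlocalLen nChara) (nChara * st.1)
    (PySem.Int.bxor addNum (PySem.Int.band ((st.2 * nPreBackadd) <<< 8) 0xffffffff), st.2 + 1)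
  (strname.toList.foldl step (1, 1)).1

-- ===== PORT B =====
-- _STEP = [2273 - sum(n % m for m in range(1, 16)) for n in range(128)], built once
def pvStepTable : List Int :=
  (PySem.List.pyRange 0 128 1).map
    (fun n => 2273 - (PySem.List.pyRange 1 16 1).foldl (fun s m => s + PySem.Int.mod n m) 0)

-- the lookup _STEP[n] is exact on the domain (all admitted chars have code < 128)
def nameAdd_alt (strname : String) (lenName : Int) (addNum : Int) : Int :=
  (PySem.List.enumerate strname.toList 1).foldl
    (fun nRet p =>
      let n : Int := p.2.toNat
      PySem.Int.bxor addNum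
        (PySem.Int.band ((p.1 * (n * nRet + PySem.List.pyGetD pvStepTable n 0)) <<< 8) 0xffffffff)) 1

-- ===== PRECONDITION & SPEC =====
def Spec_nameAdd (strname : String) (lenName : Int) (addNum : Int) (out : Int) : Prop := out = nameAdd_alt strname lenName addNum
instance (strname : String) (lenName : Int) (addNum : Int) (out : Int) : Decidable (Spec_nameAdd strname lenName addNum out) := by unfold Spec_nameAdd; infer_instance

-- ===== CLAIM (what is proved, stated in full; the proofs are below) =====
def Claim_equal_nameAdd : Prop := ∀ (strname : String) (lenName : Int) (addNum : Int), Dom_nameAdd strname lenName addNum → Spec_nameAdd strname lenName addNum (nameAdd strname lenName addNum)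

-- ===== LEMMAS AND PROOFS =====

-- table lookup computes the closed-form per-character contribution
theorem pvLookup_eq (n : Int) (h0 : 0 ≤ n) (h1 : n < 128) :
    PySem.List.pyGetD pvStepTable n 0
      = 2273 - (PySem.List.pyRange 1 16 1).foldl (fun s m => s + PySem.Int.mod n m) 0 := by
  unfold pvStepTable
  exact PySem.List.pyGetD_map_pyRange_of_nonneg _ _ _ _ h0 h1

-- A's inner recurrence collapses to the closed form tabulated by B.
theorem pvInner_eq (n r : Int) :
    (PySem.List.pyRange 0 15 1).foldl (pvInnerStep 30 n) (n * r)
      = n * r + 2273 - (PySem.List.pyRange 1 16 1).foldl (fun s m => s + PySem.Int.mod n m) 0 := by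
  simp [PySem.List.pyRange, List.range_succ, pvInnerStep, pvSerial, PySem.List.pyGet?,
        PySem.List.pyIdx?, List.foldl]
  ring

theorem pvLoop_eq (l : List Char) (addNum : Int) (hl : ∀ c ∈ l, pvDomChar c = true) :
    ∀ (r k : Int),
      (l.foldl (fun (st : Int × Int) (c : Char) =>
        let nChara : Int := c.toNat
        let pre := (PySem.List.pyRange 0 15 1).foldl (pvInnerStep 30 nChara) (nChara * st.1)
        (PySem.Int.bxor addNum (PySem.Int.band ((st.2 * pre) <<< 8) 0xffffffff), st.2 + 1)) (r, k)).1
      = (PySem.List.enumerate l k).foldl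
          (fun nRet p =>
            let n : Int := p.2.toNat
            PySem.Int.bxor addNum
              (PySem.Int.band ((p.1 * (n * nRet + PySem.List.pyGetD pvStepTable n 0)) <<< 8) 0xffffffff)) r := by
  induction l with
  | nil => intro r k; simp [PySem.List.enumerate_nil]
  | cons c t ih =>
      intro r k
      have hc : pvDomChar c = true := hl c (List.mem_cons_self ..)
      have hlt : (c.toNat : Int) < 128 := by
        simp [pvDomChar] at hc; omega
      simp only [List.foldl, PySem.List.enumerate_cons]
      rw [pvInner_eq, pvLookup_eq _ (by positivity) hlt]
      have := ih (fun c hc => hl c (List.mem_cons_of_mem _ hc))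
      rw [this]
      ring_nf

-- ===== VERDICT (by name: the statement is the Claim_ definition above) =====
theorem nameAdd_spec : Claim_equal_nameAdd := by
  intro strname lenName addNum hdom
  have hchars : ∀ c ∈ strname.toList, pvDomChar c = true := by
    simp only [Dom_nameAdd, Bool.and_eq_true, pvDomStr, List.all_eq_true] at hdom
    exact hdom.1.1
  unfold Spec_nameAdd nameAdd nameAdd_alt
  exact pvLoop_eq strname.toList addNum hchars 1 1
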